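-- pv_equiv track=rewrite | github.com/MrBrantCode/unitest_baseline | mut_generate/mist_train_cf/cf_3022/solution.py | concatenate_and_square_lists
-- ===== SOURCE A (Python) =====
-- def concatenate_and_square_lists(list1, list2):
--     concatenated_list = list1 + list2
--     squared_list = [x**2 for x in concatenated_list]
--
--     # Remove duplicates from the squared_list
--     final_list = []
--     for num in squared_list:
--         if num not in final_list:
--             final_list.append(num)
--
--     # Sort the final_list in descending order
--     for i in range(len(final_list)):
--         for j in range(i+1, len(final_list)):
--             if final_list[i] < final_list[j]:
--                 final_list[i], final_list[j] = final_list[j], final_list[i]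
--
--     return final_list
-- ===== SOURCE B (Python) =====
-- def concatenate_and_square_lists(list1, list2):
--     squared = [x * x for x in list1 + list2]
--     squared.sort(reverse=True)
--     result = []
--     for num in squared:
--         if not result or result[-1] != num:
--             result.append(num)
--     return result
-- ===== Notes on version B (the rewrite author's own statement) =====
-- stated objective: faster
-- what changed: Replaces A's quadratic membership-test dedup followed by a quadratic selection-sort with sort-first (O(n log n)) and a single linear adjacent-difference dedup pass over the sorted list.
import Mathlib
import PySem

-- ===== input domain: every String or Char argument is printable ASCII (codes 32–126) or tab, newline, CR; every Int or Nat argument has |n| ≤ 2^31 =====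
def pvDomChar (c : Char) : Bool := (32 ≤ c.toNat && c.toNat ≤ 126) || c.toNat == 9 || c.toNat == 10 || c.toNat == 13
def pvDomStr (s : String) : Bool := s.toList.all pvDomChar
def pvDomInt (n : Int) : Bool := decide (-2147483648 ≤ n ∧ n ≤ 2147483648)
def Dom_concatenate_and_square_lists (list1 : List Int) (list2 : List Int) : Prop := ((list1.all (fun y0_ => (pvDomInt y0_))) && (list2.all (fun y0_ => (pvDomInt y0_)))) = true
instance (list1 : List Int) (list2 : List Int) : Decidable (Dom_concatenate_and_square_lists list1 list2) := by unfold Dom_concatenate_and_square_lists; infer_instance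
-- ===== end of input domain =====

-- B replaces A's quadratic membership-test dedup + quadratic selection sort with
-- sort-first (O(n log n)) and one linear adjacent-difference dedup pass.

-- ===== PORT A =====
-- first-occurrence dedup: `for num in squared_list: if num not in final_list: final_list.append(num)`
def pvDedupA (xs : List Int) : List Int :=
  xs.foldl (fun acc num => if num ∉ acc then acc ++ [num] else acc) []

-- body of the inner `for j` loop: tuple swap `final_list[i], final_list[j] = final_list[j], final_list[i]`
-- guarded by `final_list[i] < final_list[j]` (both reads happen before the writes, as in Python)
def pvSwapIf (i j : Int) (l : List Int) : List Int :=
  if PySem.List.pyGetD l i 0 < PySem.List.pyGetD l j 0 then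
    PySem.List.pySetD (PySem.List.pySetD l i (PySem.List.pyGetD l j 0)) j (PySem.List.pyGetD l i 0)
  else l

-- `for j in range(i+1, len(final_list)): ...`
def pvInnerA (l : List Int) (i : Int) : List Int :=
  (PySem.List.pyRange (i + 1) (PySem.List.len l) 1).foldl (fun acc j => pvSwapIf i j acc) l

-- `for i in range(len(final_list)): ...`
def pvSortA (l : List Int) : List Int :=
  (PySem.List.pyRange 0 (PySem.List.len l) 1).foldl pvInnerA l

def concatenate_and_square_lists (list1 : List Int) (list2 : List Int) : List Int :=
  pvSortA (pvDedupA ((list1 ++ list2).map (fun x => x ^ 2)))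

-- ===== PORT B =====
-- `result.append(num)` when `not result or result[-1] != num`, over the descending-sorted squares
def pvDedupAdjB (xs : List Int) : List Int :=
  xs.foldl (fun res num =>
    if res = [] ∨ PySem.List.pyGet? res (-1) ≠ some num then res ++ [num] else res) []

def concatenate_and_square_lists_alt (list1 : List Int) (list2 : List Int) : List Int :=
  pvDedupAdjB (PySem.List.sorted ((list1 ++ list2).map (fun x => x * x)) (fun x => x) true)

-- ===== PRECONDITION & SPEC =====
def Spec_concatenate_and_square_lists (list1 : List Int) (list2 : List Int) (out : List Int) : Prop := out = concatenate_and_square_lists_alt list1 list2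
instance (list1 : List Int) (list2 : List Int) (out : List Int) : Decidable (Spec_concatenate_and_square_lists list1 list2 out) := by unfold Spec_concatenate_and_square_lists; infer_instance

-- ===== CLAIM (what is proved, stated in full; the proofs are below) =====
def Claim_equal_concatenate_and_square_lists : Prop := ∀ (list1 : List Int) (list2 : List Int), Dom_concatenate_and_square_lists list1 list2 → Spec_concatenate_and_square_lists list1 list2 (concatenate_and_square_lists list1 list2)

-- ===== LEMMAS AND PROOFS =====

-- ---- A-side dedup: nodup + membership ----
theorem pvDedupA_aux (xs : List Int) : ∀ (acc : List Int), acc.Nodup →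
    (xs.foldl (fun acc num => if num ∉ acc then acc ++ [num] else acc) acc).Nodup ∧
    (∀ a, a ∈ xs.foldl (fun acc num => if num ∉ acc then acc ++ [num] else acc) acc ↔ a ∈ acc ∨ a ∈ xs) := by
  induction xs with
  | nil => intro acc h; simpa using h
  | cons x xs ih =>
    intro acc h
    simp only [List.foldl_cons]
    by_cases hx : x ∈ acc
    · rw [if_neg (not_not_intro hx)]
      refine ⟨(ih acc h).1, fun a => ?_⟩
      rw [(ih acc h).2 a]
      simp only [List.mem_cons]
      constructor
      · tauto
      · rintro (ha | ha | ha)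
        · exact Or.inl ha
        · subst ha; exact Or.inl hx
        · exact Or.inr ha
    · rw [if_pos hx]
      have hacc : (acc ++ [x]).Nodup := by
        rw [List.nodup_append]
        refine ⟨h, by simp, ?_⟩
        intro a ha b hb
        rw [List.mem_singleton] at hb
        subst hb
        intro hab
        exact hx (hab ▸ ha)
      refine ⟨(ih _ hacc).1, fun a => ?_⟩
      rw [(ih _ hacc).2 a]
      simp only [List.mem_append, List.mem_cons]
      tauto

theorem pvDedupA_nodup (xs : List Int) : (pvDedupA xs).Nodup :=
  (pvDedupA_aux xs [] List.nodup_nil).1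

theorem mem_pvDedupA (xs : List Int) (a : Int) : a ∈ pvDedupA xs ↔ a ∈ xs := by
  have := (pvDedupA_aux xs [] List.nodup_nil).2 a
  simpa [pvDedupA] using this

-- ---- A-side selection sort, Nat form ----
def natSwap (i j : Nat) (l : List Int) : List Int :=
  if l.getD i 0 < l.getD j 0 then (l.set i (l.getD j 0)).set j (l.getD i 0) else l

def innerF (i : Nat) (l : List Int) (js : List Nat) : List Int :=
  js.foldl (fun acc j => natSwap i j acc) l

theorem pvSwapIf_natCast (i j : Nat) (l : List Int) :
    pvSwapIf (i : Int) (j : Int) l = natSwap i j l := by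
  simp [pvSwapIf, natSwap]

theorem length_natSwap (i j : Nat) (l : List Int) : (natSwap i j l).length = l.length := by
  unfold natSwap; split <;> simp

-- the two-set swap is a permutation (i < j < l.length)
theorem swap_cons_perm (a : Int) : ∀ (t : List Int) (j : Nat), j < t.length →
    List.Perm ((t.getD j 0) :: t.set j a) (a :: t) := by
  intro t
  induction t with
  | nil => intro j hj; simp at hj
  | cons x s ih =>
    intro j hj
    cases j with
    | zero => simpa using List.Perm.swap a x s
    | succ j' =>
      have hj' : j' < s.length := by simpa using hj
      have e1 : ((x :: s).getD (j' + 1) 0) :: (x :: s).set (j' + 1) a = s.getD j' 0 :: x :: s.set j' a := by simp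
      rw [e1]
      have p1 : List.Perm (s.getD j' 0 :: x :: s.set j' a) (x :: s.getD j' 0 :: s.set j' a) :=
        List.Perm.swap x _ _
      have p2 : List.Perm (x :: s.getD j' 0 :: s.set j' a) (x :: a :: s) := (ih j' hj').cons x
      have p3 : List.Perm (x :: a :: s) (a :: x :: s) := List.Perm.swap a x s
      exact (p1.trans p2).trans p3

theorem set_set_perm : ∀ (l : List Int) (i j : Nat), i < j → j < l.length →
    List.Perm ((l.set i (l.getD j 0)).set j (l.getD i 0)) l := by
  intro l
  induction l with
  | nil => intro i j _ hj; simp at hj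
  | cons x t ih =>
    intro i j hij hj
    cases i with
    | zero =>
      obtain ⟨j', rfl⟩ : ∃ j', j = j' + 1 := ⟨j - 1, by omega⟩
      have hj' : j' < t.length := by simpa using hj
      simpa using swap_cons_perm x t j' hj'
    | succ i' =>
      obtain ⟨j', rfl⟩ : ∃ j', j = j' + 1 := ⟨j - 1, by omega⟩
      have hj' : j' < t.length := by simpa using hj
      simpa using (ih i' j' (by omega) hj').cons x

theorem natSwap_perm (i j : Nat) (l : List Int) (hij : i < j) (hj : j < l.length) :
    List.Perm (natSwap i j l) l := by
  unfold natSwap; split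
  · exact set_set_perm l i j hij hj
  · exact List.Perm.refl l

theorem take_natSwap (i j n : Nat) (l : List Int) (hni : n ≤ i) (hnj : n ≤ j) :
    (natSwap i j l).take n = l.take n := by
  unfold natSwap; split
  · rw [List.take_set_of_le hnj, List.take_set_of_le hni]
  · rfl

theorem getD_set_self (l : List Int) (i : Nat) (v : Int) (h : i < l.length) :
    (l.set i v).getD i 0 = v := by
  rw [List.getD_eq_getElem _ _ (by simpa using h)]
  exact List.getElem_set_self (by simpa using h)

theorem getD_set_ne (l : List Int) (i k : Nat) (v : Int) (hne : i ≠ k) (hk : k < l.length) :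
    (l.set i v).getD k 0 = l.getD k 0 := by
  rw [List.getD_eq_getElem _ _ (by simpa using hk), List.getElem_set_ne hne, List.getD_eq_getElem _ _ hk]

-- inner-loop invariant: after processing j ∈ range' s m, position i holds an element ≥ every
-- position in (i, s+m); prefix before i untouched; permutation and length preserved.
theorem innerF_spec : ∀ (m s : Nat) (c : List Int) (i : Nat), i < s → s + m ≤ c.length →
    (∀ k, i < k → k < s → c.getD k 0 ≤ c.getD i 0) →
    List.Perm (innerF i c (List.range' s m)) c ∧
    (innerF i c (List.range' s m)).length = c.length ∧
    (innerF i c (List.range' s m)).take i = c.take i ∧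
    (∀ k, i < k → k < s + m → (innerF i c (List.range' s m)).getD k 0 ≤ (innerF i c (List.range' s m)).getD i 0) := by
  intro m
  induction m with
  | zero =>
    intro s c i his _ hinv
    refine ⟨List.Perm.refl c, rfl, rfl, fun k hk1 hk2 => hinv k hk1 (by omega)⟩
  | succ m ih =>
    intro s c i his hlen hinv
    have hs : s < c.length := by omega
    have hi : i < c.length := by omega
    rw [List.range'_succ]
    have hstep : innerF i c (s :: List.range' (s+1) m) = innerF i (natSwap i s c) (List.range' (s+1) m) := rfl
    rw [hstep]
    have hlen' : (natSwap i s c).length = c.length := length_natSwap i s c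
    have hperm' : List.Perm (natSwap i s c) c := natSwap_perm i s c his hs
    have hinv' : ∀ k, i < k → k < s + 1 → (natSwap i s c).getD k 0 ≤ (natSwap i s c).getD i 0 := by
      intro k hk1 hk2
      unfold natSwap
      by_cases hlt : c.getD i 0 < c.getD s 0
      · rw [if_pos hlt]
        have hgi : ((c.set i (c.getD s 0)).set s (c.getD i 0)).getD i 0 = c.getD s 0 := by
          rw [getD_set_ne _ s i _ (by omega) (by simpa using hi), getD_set_self _ _ _ hi]
        rcases Nat.lt_or_ge k s with hks | hks
        · have hgk : ((c.set i (c.getD s 0)).set s (c.getD i 0)).getD k 0 = c.getD k 0 := by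
            rw [getD_set_ne _ s k _ (by omega) (by simpa using (by omega : k < c.length)),
                getD_set_ne _ i k _ (by omega) (by omega)]
          rw [hgi, hgk]
          exact le_of_lt (lt_of_le_of_lt (hinv k hk1 hks) hlt)
        · have hks' : k = s := by omega
          rw [hks']
          have hgk : ((c.set i (c.getD s 0)).set s (c.getD i 0)).getD s 0 = c.getD i 0 :=
            getD_set_self _ _ _ (by simpa using hs)
          rw [hgi, hgk]; exact le_of_lt hlt
      · rw [if_neg hlt]
        rcases Nat.lt_or_ge k s with hks | hks
        · exact hinv k hk1 hks
        · have hks' : k = s := by omega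
          rw [hks']
          exact le_of_not_gt hlt
    obtain ⟨p1, p2, p3, p4⟩ := ih (s+1) (natSwap i s c) i (by omega) (by omega) hinv'
    refine ⟨p1.trans hperm', by rw [p2, hlen'], ?_, ?_⟩
    · rw [p3, take_natSwap i s i c le_rfl (by omega)]
    · intro k hk1 hk2
      exact p4 k hk1 (by omega)

-- drop-side permutation from a whole-list permutation with equal prefixes
theorem drop_perm_of_perm_of_take_eq (r c : List Int) (s : Nat) (hp : List.Perm r c)
    (ht : r.take s = c.take s) : List.Perm (r.drop s) (c.drop s) := by
  have h1 : List.Perm (r.take s ++ r.drop s) (c.take s ++ c.drop s) := by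
    simpa using hp
  rw [ht] at h1
  exact (List.perm_append_left_iff (c.take s)).1 h1

-- outer-loop invariant: prefix [0, s) is sorted descending and dominates the suffix.
theorem outerF_spec : ∀ (m s : Nat) (c : List Int), s + m = c.length →
    (c.take s).Pairwise (fun a b => b ≤ a) →
    (∀ x ∈ c.take s, ∀ y ∈ c.drop s, y ≤ x) →
    List.Perm ((List.range' s m).foldl (fun acc i => innerF i acc (List.range' (i+1) (acc.length - (i+1)))) c) c ∧
    ((List.range' s m).foldl (fun acc i => innerF i acc (List.range' (i+1) (acc.length - (i+1)))) c).Pairwise (fun a b => b ≤ a) := by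
  intro m
  induction m with
  | zero =>
    intro s c hsm hsort _
    have : c.take s = c := List.take_of_length_le (by omega)
    rw [this] at hsort
    exact ⟨List.Perm.refl c, hsort⟩
  | succ m ih =>
    intro s c hsm hsort hdom
    have hs : s < c.length := by omega
    rw [List.range'_succ, List.foldl_cons]
    obtain ⟨p1, p2, p3, p4⟩ := innerF_spec (c.length - (s+1)) (s+1) c s (by omega) (by omega) (by omega)
    set r := innerF s c (List.range' (s+1) (c.length - (s+1))) with hr
    have hsr : s < r.length := by omega
    have hdropperm : List.Perm (r.drop s) (c.drop s) := drop_perm_of_perm_of_take_eq r c s p1 p3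
    have hrs_mem : r[s] ∈ c.drop s := by
      have : r[s] ∈ r.drop s := by
        rw [List.drop_eq_getElem_cons hsr]; exact List.mem_cons_self
      exact hdropperm.mem_iff.1 this
    have htake_succ : r.take (s+1) = c.take s ++ [r[s]] := by
      rw [List.take_add_one, ← p3]
      simp [List.getElem?_eq_getElem hsr]
    -- prefix [0, s+1) of r is sorted descending
    have hsort' : (r.take (s+1)).Pairwise (fun a b => b ≤ a) := by
      rw [htake_succ, List.pairwise_append]
      refine ⟨hsort, by simp, ?_⟩
      intro x hx y hy
      simp only [List.mem_singleton] at hy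
      subst hy
      exact hdom x hx _ hrs_mem
    -- prefix dominates the suffix
    have hdom' : ∀ x ∈ r.take (s+1), ∀ y ∈ r.drop (s+1), y ≤ x := by
      intro x hx y hy
      have hymem : ∃ k, s < k ∧ k < r.length ∧ r.getD k 0 = y := by
        obtain ⟨j, hj, hjy⟩ := List.mem_iff_getElem.1 hy
        refine ⟨s+1+j, by omega, by simp at hj; omega, ?_⟩
        rw [List.getD_eq_getElem _ _ (by simp at hj; omega)]
        rw [List.getElem_drop] at hjy
        exact hjy
      rw [htake_succ, List.mem_append] at hx
      rcases hx with hx | hx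
      · -- x in the old prefix: y is in r.drop s ~ c.drop s
        have hy' : y ∈ r.drop s := by
          rw [List.drop_eq_getElem_cons hsr]
          exact List.mem_cons_of_mem _ hy
        exact hdom x hx y (hdropperm.mem_iff.1 hy')
      · -- x = r[s]: use the inner-loop max property
        simp only [List.mem_singleton] at hx
        subst hx
        obtain ⟨k, hk1, hk2, hk3⟩ := hymem
        have := p4 k hk1 (by omega)
        rw [hk3] at this
        rwa [List.getD_eq_getElem _ _ hsr] at this
    have hlenr : (s+1) + m = r.length := by omega
    obtain ⟨q1, q2⟩ := ih (s+1) r hlenr hsort' hdom'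
    have hfold : List.Perm ((List.range' (s+1) m).foldl (fun acc i => innerF i acc (List.range' (i+1) (acc.length - (i+1)))) (innerF s c (List.range' (s+1) (c.length - (s+1))))) c := by
      rw [← hr]; exact q1.trans p1
    constructor
    · simpa [hr] using hfold
    · simpa [hr] using q2

-- ---- bridges: the Int/pyRange ports equal the Nat folds ----
theorem pvInnerA_eq (l : List Int) (i : Nat) :
    pvInnerA l (i : Int) = innerF i l (List.range' (i+1) (l.length - (i+1))) := by
  unfold pvInnerA innerF
  have h1 : ((i : Int) + 1) = ((i + 1 : Nat) : Int) := by push_cast; ring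
  rw [PySem.List.len_eq, h1, PySem.List.pyRange_one]
  have h2 : ((l.length : Int) - ((i+1 : Nat) : Int)).toNat = l.length - (i+1) := by omega
  rw [h2, List.range'_eq_map_range, List.foldl_map, List.foldl_map]
  congr 1
  funext acc k
  have : ((i + 1 : Nat) : Int) + (k : Int) = ((i + 1 + k : Nat) : Int) := by push_cast; ring
  rw [this, pvSwapIf_natCast]

theorem pvSortA_eq (l : List Int) :
    pvSortA l = (List.range' 0 l.length).foldl (fun acc i => innerF i acc (List.range' (i+1) (acc.length - (i+1)))) l := by
  unfold pvSortA
  rw [PySem.List.len_eq, PySem.List.pyRange_one]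
  have h2 : ((l.length : Int) - 0).toNat = l.length := by omega
  rw [h2, List.foldl_map, ← List.range_eq_range']
  congr 1
  funext acc k
  have : (0 : Int) + (k : Int) = (k : Int) := by ring
  rw [this, pvInnerA_eq]

theorem pvSortA_perm (l : List Int) : List.Perm (pvSortA l) l := by
  rw [pvSortA_eq]
  exact (outerF_spec l.length 0 l (by omega) (by simp) (by simp)).1

theorem pvSortA_pairwise (l : List Int) : (pvSortA l).Pairwise (fun a b => b ≤ a) := by
  rw [pvSortA_eq]
  exact (outerF_spec l.length 0 l (by omega) (by simp) (by simp)).2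

-- ---- B-side adjacent dedup over a descending list ----
theorem pvDedupAdjB_aux (xs : List Int) : ∀ (acc : List Int), acc.Nodup →
    acc.Pairwise (fun a b => b ≤ a) →
    (∀ a ∈ acc, ∀ x ∈ xs, x ≤ a) →
    xs.Pairwise (fun a b => b ≤ a) →
    (xs.foldl (fun res num => if res = [] ∨ PySem.List.pyGet? res (-1) ≠ some num then res ++ [num] else res) acc).Nodup ∧
    (xs.foldl (fun res num => if res = [] ∨ PySem.List.pyGet? res (-1) ≠ some num then res ++ [num] else res) acc).Pairwise (fun a b => b ≤ a) ∧
    (∀ a, a ∈ xs.foldl (fun res num => if res = [] ∨ PySem.List.pyGet? res (-1) ≠ some num then res ++ [num] else res) acc ↔ a ∈ acc ∨ a ∈ xs) := by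
  induction xs with
  | nil => intro acc h1 h2 _ _; exact ⟨h1, h2, by simp⟩
  | cons z rest ih =>
    intro acc h1 h2 h3 h4
    simp only [List.foldl_cons]
    rw [PySem.List.pyGet?_neg_one]
    by_cases hb : acc = [] ∨ acc.getLast? ≠ some z
    · rw [if_pos hb]
      have hnum_notin : z ∉ acc := by
        intro hmem
        rcases hb with hb | hb
        · subst hb; simp at hmem
        · have hne : acc ≠ [] := by rintro rfl; simp at hmem
          have hnum_le : z ≤ acc.getLast hne :=
            h3 (acc.getLast hne) (List.getLast_mem hne) z (by simp)
          have hlast_le : acc.getLast hne ≤ z := by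
            have hdecomp : acc.dropLast ++ [acc.getLast hne] = acc := List.dropLast_append_getLast hne
            rw [← hdecomp] at hmem h2
            rw [List.mem_append] at hmem
            rcases hmem with hmem | hmem
            · rw [List.pairwise_append] at h2
              exact h2.2.2 z hmem _ (by simp)
            · simp only [List.mem_singleton] at hmem
              rw [hmem]
          have : z = acc.getLast hne := le_antisymm hnum_le hlast_le
          rw [List.getLast?_eq_some_getLast hne] at hb
          exact hb (by rw [this])
      have h1' : (acc ++ [z]).Nodup := by
        rw [List.nodup_append]
        refine ⟨h1, by simp, ?_⟩
        intro a ha b hb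
        rw [List.mem_singleton] at hb
        subst hb
        intro hab
        exact hnum_notin (hab ▸ ha)
      have h2' : (acc ++ [z]).Pairwise (fun a b => b ≤ a) := by
        rw [List.pairwise_append]
        refine ⟨h2, by simp, ?_⟩
        intro x hxm y hym
        simp only [List.mem_singleton] at hym
        rw [hym]
        exact h3 x hxm z (by simp)
      have h3' : ∀ a ∈ acc ++ [z], ∀ x ∈ rest, x ≤ a := by
        intro a ha x hx
        rw [List.mem_append] at ha
        rcases ha with ha | ha
        · exact h3 a ha x (by simp [hx])
        · simp only [List.mem_singleton] at ha; subst ha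
          exact (List.pairwise_cons.1 h4).1 x hx
      obtain ⟨q1, q2, q3⟩ := ih (acc ++ [z]) h1' h2' h3' (List.pairwise_cons.1 h4).2
      refine ⟨q1, q2, fun a => ?_⟩
      rw [q3 a]
      simp only [List.mem_append, List.mem_cons]
      tauto
    · rw [if_neg hb]
      rw [not_or, not_not] at hb
      obtain ⟨hne, hlast⟩ := hb
      have hnum_in : z ∈ acc := by
        have := List.getLast?_eq_some_getLast hne
        rw [this] at hlast
        have : z = acc.getLast hne := by injection hlast.symm
        rw [this]; exact List.getLast_mem hne
      have h3' : ∀ a ∈ acc, ∀ x ∈ rest, x ≤ a := fun a ha x hx => h3 a ha x (by simp [hx])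
      obtain ⟨q1, q2, q3⟩ := ih acc h1 h2 h3' (List.pairwise_cons.1 h4).2
      refine ⟨q1, q2, fun a => ?_⟩
      rw [q3 a]
      simp only [List.mem_cons]
      constructor
      · tauto
      · rintro (ha | ha | ha)
        · exact Or.inl ha
        · subst ha; exact Or.inl hnum_in
        · exact Or.inr ha

-- ---- glue ----
theorem square_map_eq (l : List Int) : l.map (fun x => x ^ 2) = l.map (fun x => x * x) := by
  apply List.map_congr_left
  intro x _
  ring

-- ===== VERDICT (by name: the statement is the Claim_ definition above) =====
theorem concatenate_and_square_lists_spec : Claim_equal_concatenate_and_square_lists := by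
  intro list1 list2 _
  unfold Spec_concatenate_and_square_lists concatenate_and_square_lists concatenate_and_square_lists_alt
  rw [square_map_eq]
  set sq := (list1 ++ list2).map (fun x => x * x) with hsq
  set S := pvDedupA sq with hS
  set srt := PySem.List.sorted sq (fun x => x) true with hsrt
  -- A's result: a permutation of the dedup list, sorted descending
  have hAperm : List.Perm (pvSortA S) S := pvSortA_perm S
  have hApair : (pvSortA S).Pairwise (fun a b => b ≤ a) := pvSortA_pairwise S
  have hAnodup : (pvSortA S).Nodup := hAperm.symm.nodup (pvDedupA_nodup sq)
  have hAmem : ∀ a, a ∈ pvSortA S ↔ a ∈ sq := fun a =>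
    (hAperm.mem_iff).trans (mem_pvDedupA sq a)
  -- B's result: nodup, sorted descending, same membership
  have hsrt_pair : srt.Pairwise (fun a b => b ≤ a) := by
    have := PySem.List.sorted_pairwise_rev sq (fun x => x)
    simpa [hsrt] using this
  obtain ⟨hBnodup, hBpair, hBmem⟩ :=
    pvDedupAdjB_aux srt [] List.nodup_nil (by simp) (by simp) hsrt_pair
  have hBnodup : (pvDedupAdjB srt).Nodup := hBnodup
  have hBpair : (pvDedupAdjB srt).Pairwise (fun a b => b ≤ a) := hBpair
  have hBmem' : ∀ a, a ∈ pvDedupAdjB srt ↔ a ∈ sq := by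
    intro a
    unfold pvDedupAdjB
    rw [hBmem a]
    have := (PySem.List.sorted_perm sq (fun x => x) true).mem_iff (a := a)
    simp only [← hsrt] at this
    simp [this]
  -- both are the strictly-descending arrangement of the distinct squares
  have hApair' : (pvSortA S).Pairwise (fun a b => b < a) := by
    have := hApair.and hAnodup
    exact this.imp (fun h => lt_of_le_of_ne h.1 (Ne.symm h.2))
  have hBpair' : (pvDedupAdjB srt).Pairwise (fun a b => b < a) := by
    have := hBpair.and hBnodup
    exact this.imp (fun h => lt_of_le_of_ne h.1 (Ne.symm h.2))
  have hperm : List.Perm (pvSortA S) (pvDedupAdjB srt) := by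
    rw [List.perm_ext_iff_of_nodup hAnodup hBnodup]
    intro a
    rw [hAmem a, hBmem' a]
  have e1 : PySem.List.sorted S (fun x => x) true = pvSortA S :=
    PySem.List.sorted_rev_eq_of_perm_of_pairwise_gt S (pvSortA S) (fun x => x) hAperm hApair'
  have hBpermS : List.Perm (pvDedupAdjB srt) S := (hperm.symm).trans hAperm
  have e2 : PySem.List.sorted S (fun x => x) true = pvDedupAdjB srt :=
    PySem.List.sorted_rev_eq_of_perm_of_pairwise_gt S (pvDedupAdjB srt) (fun x => x) hBpermS hBpair'
  rw [← e1, e2]
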